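-- pv_equiv track=rewrite | github.com/sbandjohn/seam_carving | sc.py | resize_sequence
-- ===== SOURCE A (Python) =====
-- import math
--
-- min_size = 20
--
-- max_step = 3
--
-- def one_sequence(a, b, step_size):
--     res = [a]
--     t = a
--     while (a<b and t<b) or (a>b and t>b):
--         if a<b:
--             t += step_size
--             if t>b: t = b
--         else:
--             t -= step_size
--             if t<b: t = b
--         res.append(t)
--     return res
--
-- def resize_sequence(r, c, out_r, out_c):
--     tot = abs(r-out_r) + abs(c-out_c)
--     step_size = max(min_size, math.ceil(tot/max_step))
--
--     rs = one_sequence(r, out_r, step_size)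
--     cs = one_sequence(c, out_c, step_size)
--     n1 = len(rs)
--     n2 = len(cs)
--     if n1<n2:
--         rs += [rs[-1]]*(n2-n1)
--     if n2<n1:
--         cs += [cs[-1]]*(n1-n2)
--     return [[rs[i], cs[i]] for i in range(1, max(n1, n2))]
-- ===== SOURCE B (Python) =====
-- import math
--
-- def resize_sequence(r, c, out_r, out_c):
--     tot = abs(r - out_r) + abs(c - out_c)
--     step = max(20, math.ceil(tot / 3))
--     # closed-form i-th coordinate on each axis; automatically clamps past the end
--     def coord(a, b, i):
--         if a < b:
--             return min(a + i * step, b)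
--         if a > b:
--             return max(a - i * step, b)
--         return b
--     n_r = (abs(out_r - r) + step - 1) // step
--     n_c = (abs(out_c - c) + step - 1) // step
--     return [[coord(r, out_r, i), coord(c, out_c, i)]
--             for i in range(1, max(n_r, n_c) + 1)]
-- ===== Notes on version B (the rewrite author's own statement) =====
-- stated objective: simpler
-- what changed: Replaces the iterative one_sequence while-loop plus last-element padding with a closed-form per-index coordinate formula (min/max clamp of a+i*step) and a ceil-division step count, building the output directly by comprehension.
import Mathlib
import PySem

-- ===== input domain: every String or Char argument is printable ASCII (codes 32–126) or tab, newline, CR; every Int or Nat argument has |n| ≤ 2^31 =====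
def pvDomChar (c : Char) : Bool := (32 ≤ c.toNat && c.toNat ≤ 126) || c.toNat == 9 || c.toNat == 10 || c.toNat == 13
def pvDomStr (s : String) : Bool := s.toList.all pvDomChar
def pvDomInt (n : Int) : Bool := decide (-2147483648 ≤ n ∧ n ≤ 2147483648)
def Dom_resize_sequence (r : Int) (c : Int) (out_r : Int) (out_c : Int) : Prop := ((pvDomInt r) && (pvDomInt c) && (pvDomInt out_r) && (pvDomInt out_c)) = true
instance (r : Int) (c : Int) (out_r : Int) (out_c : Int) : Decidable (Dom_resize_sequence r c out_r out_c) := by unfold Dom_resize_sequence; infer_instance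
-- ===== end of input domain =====

-- B replaces A's while-loop sequence building and padding with a closed-form
-- per-index coordinate formula and a ceil-division step count (objective: simpler).

-- ===== PORT A =====
-- the while loop of one_sequence; fuel = |b-a| suffices because every call site
-- passes step_size ≥ 20, so each iteration moves t at least 1 towards b
def oneSeqLoop (a b s : Int) : Int → Nat → List Int
  | _, 0 => []
  | t, fuel+1 =>
    if (a < b ∧ t < b) ∨ (a > b ∧ t > b) then
      let t' := if a < b then (if t + s > b then b else t + s)
                else (if t - s < b then b else t - s)
      t' :: oneSeqLoop a b s t' fuel
    else []

def one_sequence (a b s : Int) : List Int := a :: oneSeqLoop a b s a (b - a).natAbs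

def resize_sequence (r : Int) (c : Int) (out_r : Int) (out_c : Int) : List (List Int) :=
  let tot := |r - out_r| + |c - out_c|
  let step_size := max 20 ((tot + 2) / 3)   -- math.ceil(tot/3); exact since tot ≥ 0
  let rs := one_sequence r out_r step_size
  let cs := one_sequence c out_c step_size
  let n1 := rs.length
  let n2 := cs.length
  -- rs[-1] on the (always nonempty) list is getLastD; rs[i] below is always in range
  let rs' := if n1 < n2 then rs ++ List.replicate (n2 - n1) (rs.getLastD 0) else rs
  let cs' := if n2 < n1 then cs ++ List.replicate (n1 - n2) (cs.getLastD 0) else cs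
  (List.range' 1 (max n1 n2 - 1)).map (fun i => [rs'.getD i 0, cs'.getD i 0])

-- ===== PORT B =====
def coordB (a b step i : Int) : Int :=
  if a < b then min (a + i * step) b
  else if a > b then max (a - i * step) b
  else b

def resize_sequence_alt (r : Int) (c : Int) (out_r : Int) (out_c : Int) : List (List Int) :=
  let tot := |r - out_r| + |c - out_c|
  let step := max 20 ((tot + 2) / 3)       -- math.ceil(tot/3); exact since tot ≥ 0
  let n_r := (((out_r - r).natAbs : Int) + step - 1) / step   -- `//` with step > 0
  let n_c := (((out_c - c).natAbs : Int) + step - 1) / step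
  (List.range' 1 (max n_r n_c).toNat).map
    (fun i : Nat => [coordB r out_r step i, coordB c out_c step i])

-- ===== PRECONDITION & SPEC =====
def Spec_resize_sequence (r : Int) (c : Int) (out_r : Int) (out_c : Int) (out : List (List Int)) : Prop := out = resize_sequence_alt r c out_r out_c
instance (r : Int) (c : Int) (out_r : Int) (out_c : Int) (out : List (List Int)) : Decidable (Spec_resize_sequence r c out_r out_c out) := by unfold Spec_resize_sequence; infer_instance

-- ===== CLAIM (what is proved, stated in full; the proofs are below) =====
def Claim_equal_resize_sequence : Prop := ∀ (r : Int) (c : Int) (out_r : Int) (out_c : Int), Dom_resize_sequence r c out_r out_c → Spec_resize_sequence r c out_r out_c (resize_sequence r c out_r out_c)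

-- ===== LEMMAS AND PROOFS =====

lemma ediv_zero_of (s q : Int) (h0 : 0 ≤ q) (h1 : q < s) : q / s = 0 :=
  Int.ediv_eq_zero_of_lt h0 h1

lemma ceil_step (d s : Int) (hs : s ≠ 0) : (d + s - 1) / s = (d - s + s - 1) / s + 1 := by
  have : d + s - 1 = (d - s + s - 1) + 1 * s := by ring
  rw [this, Int.add_mul_ediv_right _ _ hs]

-- the loop for a < b lists min (t + k*s) b for k = 1 .. ceil((b-t)/s)
lemma oneSeqLoop_lt (s : Int) (hs : 1 ≤ s) : ∀ (fuel : Nat) (a b t : Int), a < b → t ≤ b →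
    (b - t).toNat ≤ fuel →
    oneSeqLoop a b s t fuel
      = (List.range' 1 ((b - t + s - 1) / s).toNat).map (fun k : Nat => min (t + (k : Int) * s) b) := by
  intro fuel
  induction fuel with
  | zero =>
    intro a b t hab htb hf
    have h0 : (b - t + s - 1) / s = 0 := by
      rw [show b - t + s - 1 = s - 1 by omega]
      exact ediv_zero_of s _ (by omega) (by omega)
    simp [oneSeqLoop, h0]
  | succ n ih =>
    intro a b t hab htb hf
    by_cases htlt : t < b
    · have hcond : (a < b ∧ t < b) ∨ (a > b ∧ t > b) := Or.inl ⟨hab, htlt⟩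
      rw [oneSeqLoop]
      simp only [if_pos hcond, if_pos hab]
      set t' : Int := if t + s > b then b else t + s with ht'
      have ht'le : t' ≤ b := by rw [ht']; split <;> omega
      have ht'ge : t + 1 ≤ t' := by rw [ht']; split <;> omega
      have hrec := ih a b t' hab ht'le (by omega)
      rw [hrec]
      have hN : ((b - t + s - 1) / s) = (b - t' + s - 1) / s + 1 := by
        by_cases h : t + s ≤ b
        · have ht'' : t' = t + s := by rw [ht']; split <;> omega
          rw [ht'', ceil_step (b - t) s (by omega)]
          congr 2
          ring
        · have ht'' : t' = b := by rw [ht']; split <;> omega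
          rw [ht'', ceil_step (b - t) s (by omega)]
          have h1 : (b - t - s + s - 1) / s = 0 := ediv_zero_of s _ (by omega) (by omega)
          have h2 : (b - b + s - 1) / s = 0 := by
            rw [show b - b + s - 1 = s - 1 by ring]
            exact ediv_zero_of s _ (by omega) (by omega)
          omega
      have hN' : (0:Int) ≤ (b - t' + s - 1) / s := Int.ediv_nonneg (by omega) (by omega)
      rw [hN]
      have htn : ((b - t' + s - 1) / s + 1).toNat = ((b - t' + s - 1) / s).toNat + 1 := by omega
      rw [htn]
      rw [show List.range' 1 (((b - t' + s - 1) / s).toNat + 1)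
            = 1 :: List.range' 2 (((b - t' + s - 1) / s).toNat) from rfl]
      rw [List.map_cons]
      refine List.cons_eq_cons.mpr ⟨?_, ?_⟩
      · rw [ht']; push_cast; split <;> omega
      · by_cases h : t + s ≤ b
        · have ht'' : t' = t + s := by rw [ht']; split <;> omega
          rw [List.range'_eq_map_range, List.range'_eq_map_range, List.map_map, List.map_map]
          apply List.map_congr_left
          intro k _
          simp only [Function.comp_apply]
          rw [ht'']
          push_cast
          congr 1
          ring
        · have ht'' : t' = b := by rw [ht']; split <;> omega
          have h1 : (b - t' + s - 1) / s = 0 := by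
            rw [ht'', show b - b + s - 1 = s - 1 by ring]
            exact ediv_zero_of s _ (by omega) (by omega)
          rw [h1]
          simp
    · have ht : t = b := by omega
      have hcond : ¬ ((a < b ∧ t < b) ∨ (a > b ∧ t > b)) := by omega
      rw [oneSeqLoop, if_neg hcond]
      have h0 : (b - t + s - 1) / s = 0 := by
        rw [show b - t + s - 1 = s - 1 by omega]
        exact ediv_zero_of s _ (by omega) (by omega)
      simp [h0]

-- negation mirror of the loop
lemma oneSeqLoop_neg (s : Int) : ∀ (fuel : Nat) (a b t : Int),
    oneSeqLoop a b s t fuel = (oneSeqLoop (-a) (-b) s (-t) fuel).map (fun x => -x) := by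
  intro fuel
  induction fuel with
  | zero => intro a b t; simp [oneSeqLoop]
  | succ n ih =>
    intro a b t
    by_cases hcond : (a < b ∧ t < b) ∨ (a > b ∧ t > b)
    · have hcond' : (-a < -b ∧ -t < -b) ∨ (-a > -b ∧ -t > -b) := by omega
      rw [oneSeqLoop, if_pos hcond, oneSeqLoop, if_pos hcond']
      dsimp only
      have harg : (if -a < -b then (if -t + s > -b then -b else -t + s)
                   else (if -t - s < -b then -b else -t - s))
          = -(if a < b then (if t + s > b then b else t + s)
              else (if t - s < b then b else t - s)) := by
        split_ifs <;> omega
      rw [harg, List.map_cons]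
      refine List.cons_eq_cons.mpr ⟨by omega, ?_⟩
      exact ih a b _
    · have hcond' : ¬ ((-a < -b ∧ -t < -b) ∨ (-a > -b ∧ -t > -b)) := by omega
      rw [oneSeqLoop, if_neg hcond, oneSeqLoop, if_neg hcond']
      simp

-- closed-form characterisation of one_sequence
lemma oneSeq_eq (a b s : Int) (hs : 1 ≤ s) :
    one_sequence a b s
      = (List.range' 0 (((((b - a).natAbs : Int) + s - 1) / s).toNat + 1)).map
          (fun k : Nat => coordB a b s k) := by
  have hhead : coordB a b s 0 = a := by
    simp only [coordB, zero_mul, add_zero, sub_zero]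
    split_ifs <;> omega
  rw [show List.range' 0 ((((((b - a).natAbs : Int) + s - 1) / s).toNat) + 1)
        = 0 :: List.range' 1 (((((b - a).natAbs : Int) + s - 1) / s).toNat) from rfl]
  rw [List.map_cons]
  unfold one_sequence
  refine List.cons_eq_cons.mpr ⟨by simpa using hhead.symm, ?_⟩
  rcases lt_trichotomy a b with hab | hab | hab
  · have hd : ((b - a).natAbs : Int) = b - a := by omega
    rw [oneSeqLoop_lt s hs _ a b a hab (by omega) (by omega), hd]
    apply List.map_congr_left
    intro k _
    rw [coordB, if_pos hab]
  · subst hab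
    have hd : (a - a).natAbs = 0 := by omega
    rw [hd]
    have h0 : ((((0:Nat)) : Int) + s - 1) / s = 0 := by
      rw [show (((0:Nat)) : Int) + s - 1 = s - 1 by simp]
      exact ediv_zero_of s _ (by omega) (by omega)
    rw [h0]
    simp [oneSeqLoop]
  · have hd : ((b - a).natAbs : Int) = a - b := by omega
    rw [oneSeqLoop_neg s _ a b a]
    rw [oneSeqLoop_lt s hs _ (-a) (-b) (-a) (by omega) (by omega) (by omega)]
    rw [show -b - -a + s - 1 = a - b + s - 1 by ring, hd]
    rw [List.map_map]
    apply List.map_congr_left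
    intro k _
    simp only [Function.comp_apply]
    rw [coordB, if_neg (by omega), if_pos (by omega)]
    generalize (k : Int) * s = x
    omega

-- past the step count, coordB has reached b
lemma coordB_ge (a b s : Int) (hs : 1 ≤ s) (i : Int)
    (hi : (((b - a).natAbs : Int) + s - 1) / s ≤ i) : coordB a b s i = b := by
  set d : Int := ((b - a).natAbs : Int) with hd
  have hd0 : 0 ≤ d := by positivity
  have h1 := Int.mul_ediv_add_emod (d + s - 1) s
  have h2 := Int.emod_nonneg (d + s - 1) (by omega : s ≠ 0)
  have h3 := Int.emod_lt_of_pos (d + s - 1) (by omega : (0:Int) < s)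
  have hN : d ≤ s * ((d + s - 1) / s) := by linarith
  have hmul : s * ((d + s - 1) / s) ≤ s * i := by
    apply mul_le_mul_of_nonneg_left hi (by omega)
  have hsi : d ≤ s * i := le_trans hN hmul
  rw [mul_comm] at hsi
  unfold coordB
  split_ifs with h4 h5
  · have hdv : d = b - a := by omega
    exact min_eq_right (by omega)
  · have hdv : d = a - b := by omega
    exact max_eq_right (by omega)
  · omega

-- padded lookup into the closed-form list
lemma getD_pad (f : Nat → Int) (n m i : Nat) (hi : i < 1 + m) (hn : n ≤ m)
    (hconst : ∀ j : Nat, n ≤ j → f j = f n) :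
    (((List.range' 0 (n+1)).map f)
        ++ List.replicate (m + 1 - ((List.range' 0 (n+1)).map f).length)
            (((List.range' 0 (n+1)).map f).getLastD 0)).getD i 0 = f i := by
  have hlen : ((List.range' 0 (n+1)).map f).length = n + 1 := by simp
  have hlast : ((List.range' 0 (n+1)).map f).getLastD 0 = f n := by
    rw [List.range'_concat, List.map_append]
    simp
  by_cases h : i < n + 1
  · rw [List.getD_append _ _ _ _ (by omega)]
    rw [List.getD_eq_getElem _ _ (by simpa using h)]
    simp [List.getElem_range']
  · rw [List.getD_append_right _ _ _ _ (by omega)]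
    rw [hlast, hlen]
    rw [List.getD_eq_getElem?_getD, List.getElem?_replicate]
    rw [if_pos (by omega)]
    simp [hconst i (by omega)]


-- one axis of the padded output equals the closed form
lemma axis_getD (a b s : Int) (hs : 1 ≤ s) (other i : Nat)
    (hi : i < 1 + max (((((b - a).natAbs : Int) + s - 1) / s).toNat) other) :
    ((if ((((b - a).natAbs : Int) + s - 1) / s).toNat + 1 < other + 1 then
        (List.range' 0 (((((b - a).natAbs : Int) + s - 1) / s).toNat + 1)).map
            (fun k : Nat => coordB a b s k)
          ++ List.replicate (other + 1 - (((((b - a).natAbs : Int) + s - 1) / s).toNat + 1))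
              (((List.range' 0 (((((b - a).natAbs : Int) + s - 1) / s).toNat + 1)).map
                  (fun k : Nat => coordB a b s k)).getLastD 0)
      else
        (List.range' 0 (((((b - a).natAbs : Int) + s - 1) / s).toNat + 1)).map
            (fun k : Nat => coordB a b s k)).getD i 0)
      = coordB a b s i := by
  set N : Int := (((b - a).natAbs : Int) + s - 1) / s with hN
  have hN0 : 0 ≤ N := Int.ediv_nonneg (by omega) (by omega)
  set n : Nat := N.toNat with hn
  set L := (List.range' 0 (n+1)).map (fun k : Nat => coordB a b s k) with hL
  have hlen : L.length = n + 1 := by simp [hL]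
  have hstep : (if n + 1 < other + 1 then
        L ++ List.replicate (other + 1 - (n+1)) (L.getLastD 0) else L)
      = L ++ List.replicate (max n other + 1 - L.length) (L.getLastD 0) := by
    rw [hlen]
    split_ifs with h
    · congr 2
      omega
    · rw [show max n other + 1 - (n+1) = 0 by omega]
      simp
  rw [hstep, hL]
  apply getD_pad _ n (max n other) i (by omega) (by omega)
  intro j hj
  rw [coordB_ge a b s hs j (by rw [← hN]; omega),
      coordB_ge a b s hs n (by rw [← hN]; omega)]

-- ===== VERDICT (by name: the statement is the Claim_ definition above) =====
theorem resize_sequence_spec : Claim_equal_resize_sequence := by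
  intro r c out_r out_c _
  unfold Spec_resize_sequence resize_sequence resize_sequence_alt
  dsimp only
  set s : Int := max 20 ((|r - out_r| + |c - out_c| + 2) / 3) with hsdef
  have hs : (1:Int) ≤ s := le_trans (by norm_num) (le_max_left _ _)
  set Nr : Int := (((out_r - r).natAbs : Int) + s - 1) / s with hNrdef
  set Nc : Int := (((out_c - c).natAbs : Int) + s - 1) / s with hNcdef
  have hNr0 : 0 ≤ Nr := Int.ediv_nonneg (by omega) (by omega)
  have hNc0 : 0 ≤ Nc := Int.ediv_nonneg (by omega) (by omega)
  have hrs := oneSeq_eq r out_r s hs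
  have hcs := oneSeq_eq c out_c s hs
  rw [hrs, hcs]
  simp only [List.length_map, List.length_range']
  set M : Nat := max Nr.toNat Nc.toNat with hM
  have hmax1 : max (Nr.toNat + 1) (Nc.toNat + 1) - 1 = M := by omega
  have hmax2 : (max Nr Nc).toNat = M := by omega
  rw [hmax1, hmax2]
  apply List.map_congr_left
  intro i hi
  rw [List.mem_range'_1] at hi
  rw [axis_getD r out_r s hs Nc.toNat i (by rw [← hNrdef]; omega),
      axis_getD c out_c s hs Nr.toNat i (by rw [← hNcdef]; omega)]
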